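-- pv_equiv track=rewrite | github.com/minxxcozy/Podium-IDS | models/predict_submission.py | replay_spoofing_heuristic
-- ===== SOURCE A (Python) =====
-- from collections import Counter
-- from typing import List
--
-- def replay_spoofing_heuristic(labels: List[str], window: int = 5) -> List[str]:
--     """
--     Replay / Spoofing 구간을 가볍게 후처리하는 heuristic.
--
--     아이디어:
--     - Replay는 보통 일정 구간 연속으로 나타나는 경향이 있음.
--       → 주변 window 범위에서 자신만 Replay이면 과한 False Positive일 가능성이 높음.
--       → 이 경우 Spoofing 또는 Normal로 조정.
--     - 두 클래스는 Weighted F1 비중이 높으므로 (0.3 + 0.3),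
--       잘못된 단일 Replay peak를 줄여 점수 안정성 확보.
--     """
--     out = list(labels)
--     n = len(out)
--     for i in range(n):
--         if out[i] != "Replay":
--             continue
--         # 주변 window 내 label 통계
--         start = max(0, i - window)
--         end = min(n, i + window + 1)
--         ctx = out[start:end]
--         cnt = Counter(ctx)
--         # 이 구간 내 Replay가 자기 하나 뿐이고, Spoofing이 더 많다면 Spoofing으로 조정
--         if cnt["Replay"] == 1:
--             if cnt["Spoofing"] > 0:
--                 out[i] = "Spoofing"
--             elif cnt["Normal"] > 0 and cnt["Spoofing"] == 0:
--                 # 주변이 전부 Normal이면, 공격으로 볼 근거가 약하다고 보고 Normal로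
--                 out[i] = "Normal"
--     return out
-- ===== SOURCE B (Python) =====
-- from typing import List
--
--
-- def replay_spoofing_heuristic(labels: List[str], window: int = 5) -> List[str]:
--     """Sliding-window version: keeps incremental counts of the three labels
--     of interest over the current window, updating them when an element is
--     rewritten and when the window slides, instead of recounting per index
--     with a fresh Counter."""
--     out = list(labels)
--     n = len(out)
--     if window < 0 or n == 0:
--         return out
--
--     def bump(label, delta, r, s, m):
--         if label == "Replay":
--             r += delta
--         elif label == "Spoofing":
--             s += delta
--         elif label == "Normal":
--             m += delta
--         return r, s, m
--
--     # counts over the initial window [0, min(n, window + 1))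
--     r = s = m = 0
--     for j in range(min(n, window + 1)):
--         r, s, m = bump(out[j], 1, r, s, m)
--
--     for i in range(n):
--         if out[i] == "Replay" and r == 1:
--             if s > 0:
--                 out[i] = "Spoofing"
--                 r, s, m = r - 1, s + 1, m
--             elif m > 0:
--                 out[i] = "Normal"
--                 r, s, m = r - 1, s, m + 1
--         # slide the window to be centred on i + 1
--         lo = i - window
--         if lo >= 0:
--             r, s, m = bump(out[lo], -1, r, s, m)
--         hi = i + window + 1
--         if hi < n:
--             r, s, m = bump(out[hi], 1, r, s, m)
--     return out
-- ===== Notes on version B (the rewrite author's own statement) =====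
-- stated objective: alternative
-- what changed: A recounts the whole surrounding window with a fresh Counter at every Replay index; B keeps incremental sliding-window counts of the three relevant labels across one pass, updating them as the window slides and when a label is rewritten in place.
import Mathlib
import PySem

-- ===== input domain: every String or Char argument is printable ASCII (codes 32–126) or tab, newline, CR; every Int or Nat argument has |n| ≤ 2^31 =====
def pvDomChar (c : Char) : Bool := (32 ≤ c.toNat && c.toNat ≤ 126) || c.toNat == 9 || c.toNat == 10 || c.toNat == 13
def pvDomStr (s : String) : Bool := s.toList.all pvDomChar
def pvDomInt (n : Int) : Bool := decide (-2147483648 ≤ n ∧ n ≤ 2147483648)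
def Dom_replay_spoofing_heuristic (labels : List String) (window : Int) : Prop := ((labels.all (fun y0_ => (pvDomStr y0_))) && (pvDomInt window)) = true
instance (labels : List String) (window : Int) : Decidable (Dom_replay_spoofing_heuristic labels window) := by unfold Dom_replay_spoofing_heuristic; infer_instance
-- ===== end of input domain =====

-- B replaces A's per-index Counter recount of the surrounding window by incremental
-- sliding-window counts of the three relevant labels, maintained across the single pass
-- and updated when a label is rewritten in place.

-- ===== PORT A =====
def replay_spoofing_heuristic (labels : List String) (window : Int) : List String :=
  let out := labels
  let n := out.length
  (PySem.List.pyRange 0 (n : Int) 1).foldl (fun out i =>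
    if PySem.List.pyGetD out i "" ≠ "Replay" then out
    else
      let start := max 0 (i - window)
      let stop := min (n : Int) (i + window + 1)
      let ctx := PySem.List.slice out (some start) (some stop)
      let cnt := PySem.Dict.counter ctx
      if cnt.getD "Replay" 0 == 1 then
        if cnt.getD "Spoofing" 0 > 0 then PySem.List.pySetD out i "Spoofing"
        else if cnt.getD "Normal" 0 > 0 && cnt.getD "Spoofing" 0 == 0 then PySem.List.pySetD out i "Normal"
        else out
      else out) out

-- ===== PORT B =====
-- helper 'bump' of Source B: adjust the (Replay, Spoofing, Normal) count triple for one label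
def pvBump (label : String) (delta : Int) (t : Int × Int × Int) : Int × Int × Int :=
  if label == "Replay" then (t.1 + delta, t.2.1, t.2.2)
  else if label == "Spoofing" then (t.1, t.2.1 + delta, t.2.2)
  else if label == "Normal" then (t.1, t.2.1, t.2.2 + delta)
  else t

def replay_spoofing_heuristic_alt (labels : List String) (window : Int) : List String :=
  let out := labels
  let n := out.length
  if window < 0 || n == 0 then out
  else
    -- counts over the initial window [0, min(n, window + 1))
    let init : Int × Int × Int :=
      (PySem.List.pyRange 0 (min (n : Int) (window + 1)) 1).foldl
        (fun t j => pvBump (PySem.List.pyGetD out j "") 1 t) (0, 0, 0)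
    let res : List String × Int × Int × Int :=
      (PySem.List.pyRange 0 (n : Int) 1).foldl (fun st i =>
        let out := st.1
        let r := st.2.1
        let s := st.2.2.1
        let m := st.2.2.2
        let st1 : List String × Int × Int × Int :=
          if PySem.List.pyGetD out i "" == "Replay" && r == 1 then
            if s > 0 then (PySem.List.pySetD out i "Spoofing", r - 1, s + 1, m)
            else if m > 0 then (PySem.List.pySetD out i "Normal", r - 1, s, m + 1)
            else (out, r, s, m)
          else (out, r, s, m)
        -- slide the window to be centred on i + 1
        let lo := i - window
        let st2 : List String × Int × Int × Int :=
          if lo ≥ 0 then (st1.1, pvBump (PySem.List.pyGetD st1.1 lo "") (-1) st1.2) else st1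
        let hi := i + window + 1
        if hi < (n : Int) then (st2.1, pvBump (PySem.List.pyGetD st2.1 hi "") 1 st2.2) else st2)
        (out, init)
    res.1

-- ===== PRECONDITION & SPEC =====
-- Pre_ restricts to the natural domain window ≥ 0: a negative window is a malformed
-- neighbourhood size, on which A's slice end min(n, i+window+1) can go negative and wrap
-- around Python-style, an artefact of slicing; B treats such a window as empty.
def Pre_replay_spoofing_heuristic (labels : List String) (window : Int) : Prop := 0 ≤ window
instance (labels : List String) (window : Int) : Decidable (Pre_replay_spoofing_heuristic labels window) := by unfold Pre_replay_spoofing_heuristic; infer_instance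
def pvWitness_replay_spoofing_heuristic : List String × Int := (["Spoofing", "Replay", "Normal"], 1)

def Spec_replay_spoofing_heuristic (labels : List String) (window : Int) (out : List String) : Prop := out = replay_spoofing_heuristic_alt labels window
instance (labels : List String) (window : Int) (out : List String) : Decidable (Spec_replay_spoofing_heuristic labels window out) := by unfold Spec_replay_spoofing_heuristic; infer_instance

-- ===== CLAIM (what is proved, stated in full; the proofs are below) =====
def Claim_equal_replay_spoofing_heuristic : Prop := ∀ (labels : List String) (window : Int), Dom_replay_spoofing_heuristic labels window → Pre_replay_spoofing_heuristic labels window → Spec_replay_spoofing_heuristic labels window (replay_spoofing_heuristic labels window)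

-- ===== LEMMAS AND PROOFS =====

-- number of occurrences of v among positions [a, b) of l (clamped at the ends)
def icount (l : List String) (a b : Nat) (v : String) : Nat :=
  ((l.drop a).take (b - a)).count v

theorem icount_split (l : List String) (a m b : Nat) (h1 : a ≤ m) (h2 : m ≤ b) (v : String) :
    icount l a b v = icount l a m v + icount l m b v := by
  unfold icount
  have hb : b - a = (m - a) + (b - m) := by omega
  rw [hb, List.take_add, List.count_append, List.drop_drop]
  have h3 : a + (m - a) = m := by omega
  rw [h3]

theorem icount_singleton (l : List String) (a : Nat) (ha : a < l.length) (v : String) :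
    icount l a (a + 1) v = if l.getD a "" = v then 1 else 0 := by
  unfold icount
  rw [List.drop_eq_getElem_cons ha]
  have h1 : a + 1 - a = 1 := by omega
  rw [h1, List.take_succ_cons, List.take_zero, List.getD_eq_getElem l "" ha]
  rw [List.count_cons]
  simp only [List.count_nil, beq_iff_eq, Nat.zero_add]

theorem icount_empty (l : List String) (a b : Nat) (h : b ≤ a) (v : String) :
    icount l a b v = 0 := by
  unfold icount
  rw [Nat.sub_eq_zero_of_le h]
  simp

theorem icount_right (l : List String) (a b : Nat) (h : a ≤ b) (hb : b < l.length) (v : String) :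
    icount l a (b + 1) v = icount l a b v + (if l.getD b "" = v then 1 else 0) := by
  rw [icount_split l a b (b+1) h (by omega), icount_singleton l b hb]

theorem icount_left (l : List String) (a b : Nat) (ha : a < l.length) (h : a < b) (v : String) :
    icount l a b v = (if l.getD a "" = v then 1 else 0) + icount l (a + 1) b v := by
  rw [icount_split l a (a+1) b (by omega) h, icount_singleton l a ha, Nat.add_comm]

theorem icount_set_in (l : List String) (a b j : Nat) (x : String)
    (h1 : a ≤ j) (h2 : j < b) (hj : j < l.length) (v : String) :
    icount (l.set j x) a b v + (if l.getD j "" = v then 1 else 0)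
      = icount l a b v + (if x = v then 1 else 0) := by
  unfold icount
  rw [List.drop_set, if_neg (by omega), List.take_set]
  have hlen : j - a < ((l.drop a).take (b - a)).length := by
    simp only [List.length_take, List.length_drop]
    omega
  rw [List.count_set hlen]
  have hget : ((l.drop a).take (b - a))[j - a] = l[j] := by
    rw [List.getElem_take, List.getElem_drop]
    congr 1
    omega
  rw [hget, List.getD_eq_getElem l "" hj]
  have hc : List.count v ((l.drop a).take (b - a)) ≥ (if (l[j] == v) = true then 1 else 0) := by
    split
    · rename_i hv
      have hmem : v ∈ (l.drop a).take (b - a) := by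
        rw [← (beq_iff_eq).mp hv, ← hget]
        exact List.getElem_mem hlen
      exact List.count_pos_iff.mpr hmem
    · exact Nat.zero_le _
  simp only [beq_iff_eq] at *
  by_cases hv : l[j] = v <;> by_cases hx : x = v <;>
    simp only [hv, hx, if_pos, if_true, if_false] <;>
    simp only [hv, hx, if_true, if_false] at hc <;> omega

-- the count of v in the window of radius W centred at position k
def wcnt (W : Nat) (l : List String) (k : Nat) (v : String) : Nat :=
  icount l (k - W) (min l.length (k + W + 1)) v

theorem wcnt_zero (W : Nat) (l : List String) (v : String) :
    wcnt W l 0 v = icount l 0 (min l.length (W + 1)) v := by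
  unfold wcnt
  have e1 : 0 - W = 0 := by omega
  have e2 : 0 + W + 1 = W + 1 := by omega
  rw [e1, e2]

theorem wcnt_set (W : Nat) (l : List String) (k : Nat) (x v : String) (hk : k < l.length) :
    wcnt W (l.set k x) k v + (if l.getD k "" = v then 1 else 0)
      = wcnt W l k v + (if x = v then 1 else 0) := by
  unfold wcnt
  rw [List.length_set]
  exact icount_set_in l (k - W) (min l.length (k + W + 1)) k x (by omega) (by omega) hk v

theorem wcnt_slide (W : Nat) (l : List String) (k : Nat) (v : String) (hk : k < l.length) :
    wcnt W l (k + 1) v + (if W ≤ k then (if l.getD (k - W) "" = v then 1 else 0) else 0)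
      = wcnt W l k v + (if k + W + 1 < l.length then (if l.getD (k + W + 1) "" = v then 1 else 0) else 0) := by
  unfold wcnt
  by_cases ha : W ≤ k <;> by_cases hb : k + W + 1 < l.length
  · rw [if_pos ha, if_pos hb]
    have e1 : min l.length (k + 1 + W + 1) = k + W + 2 := by omega
    have e2 : min l.length (k + W + 1) = k + W + 1 := by omega
    rw [e1, e2]
    rw [icount_right l (k + 1 - W) (k + W + 1) (by omega) hb v]
    rw [icount_left l (k - W) (k + W + 1) (by omega) (by omega) v]
    have e3 : k + 1 - W = k - W + 1 := by omega
    rw [e3]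
    omega
  · rw [if_pos ha, if_neg hb]
    have e1 : min l.length (k + 1 + W + 1) = l.length := by omega
    have e2 : min l.length (k + W + 1) = l.length := by omega
    rw [e1, e2]
    rw [icount_left l (k - W) l.length (by omega) (by omega) v]
    have e3 : k + 1 - W = k - W + 1 := by omega
    rw [e3]
    omega
  · rw [if_neg ha, if_pos hb]
    have e0 : k + 1 - W = 0 := by omega
    have e0' : k - W = 0 := by omega
    have e1 : min l.length (k + 1 + W + 1) = k + W + 2 := by omega
    have e2 : min l.length (k + W + 1) = k + W + 1 := by omega
    rw [e0, e0', e1, e2]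
    rw [icount_right l 0 (k + W + 1) (by omega) hb v]
    omega
  · rw [if_neg ha, if_neg hb]
    have e0 : k + 1 - W = 0 := by omega
    have e0' : k - W = 0 := by omega
    have e1 : min l.length (k + 1 + W + 1) = l.length := by omega
    have e2 : min l.length (k + W + 1) = l.length := by omega
    rw [e0, e0', e1, e2]

-- pvBump acts independently on the three buckets
theorem pvBump_eq (x : String) (d : Int) (t : Int × Int × Int) :
    pvBump x d t = (t.1 + (if x = "Replay" then d else 0),
                    t.2.1 + (if x = "Spoofing" then d else 0),
                    t.2.2 + (if x = "Normal" then d else 0)) := by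
  unfold pvBump
  simp only [beq_iff_eq]
  split_ifs with h1 h2 h3 <;> simp_all

-- the write phase of B's loop body
def pvWrite (window : Int) (st : List String × Int × Int × Int) (i : Int) : List String × Int × Int × Int :=
  if PySem.List.pyGetD st.1 i "" == "Replay" && st.2.1 == 1 then
    if st.2.2.1 > 0 then (PySem.List.pySetD st.1 i "Spoofing", st.2.1 - 1, st.2.2.1 + 1, st.2.2.2)
    else if st.2.2.2 > 0 then (PySem.List.pySetD st.1 i "Normal", st.2.1 - 1, st.2.2.1, st.2.2.2 + 1)
    else st
  else st

-- the slide phase of B's loop body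
def pvSlideFun (window : Int) (n : Nat) (st1 : List String × Int × Int × Int) (i : Int) : List String × Int × Int × Int :=
  let lo := i - window
  let st2 := if lo ≥ 0 then (st1.1, pvBump (PySem.List.pyGetD st1.1 lo "") (-1) st1.2) else st1
  let hi := i + window + 1
  if hi < (n : Int) then (st2.1, pvBump (PySem.List.pyGetD st2.1 hi "") 1 st2.2) else st2

theorem pvSlide_inv (window : Int) (hw : 0 ≤ window) (l : List String) (n k : Nat)
    (hlen : l.length = n) (hk : k < n) :
    pvSlideFun window n
      (l, (wcnt window.toNat l k "Replay" : Int), (wcnt window.toNat l k "Spoofing" : Int),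
          (wcnt window.toNat l k "Normal" : Int)) (k : Int)
    = (l, (wcnt window.toNat l (k + 1) "Replay" : Int), (wcnt window.toNat l (k + 1) "Spoofing" : Int),
          (wcnt window.toNat l (k + 1) "Normal" : Int)) := by
  have hW : ((window.toNat : Int)) = window := Int.toNat_of_nonneg hw
  set W := window.toNat with hWdef
  have hkl : k < l.length := by omega
  have SR := wcnt_slide W l k "Replay" hkl
  have SS := wcnt_slide W l k "Spoofing" hkl
  have SN := wcnt_slide W l k "Normal" hkl
  by_cases hlo : W ≤ k <;> by_cases hhi : k + W + 1 < n
  · simp only [pvSlideFun]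
    rw [if_pos (show ((k : Int) - window ≥ 0) by omega)]
    rw [if_pos (show ((k : Int) + window + 1 < (n : Int)) by omega)]
    have e1 : (k : Int) - window = ((k - W : Nat) : Int) := by omega
    have e2 : (k : Int) + window + 1 = ((k + W + 1 : Nat) : Int) := by omega
    rw [e1, e2]
    simp only [PySem.List.pyGetD_natCast, pvBump_eq, Prod.mk.injEq]
    rw [if_pos hlo, if_pos (show k + W + 1 < l.length by omega)] at SR SS SN
    refine ⟨by trivial, ?_, ?_, ?_⟩
    · by_cases h1 : l.getD (k - W) "" = "Replay" <;> by_cases h2 : l.getD (k + W + 1) "" = "Replay" <;>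
        simp only [h1, h2, if_true, if_false, ite_true, ite_false, eq_self_iff_true, not_false_iff] at SR ⊢ <;> omega
    · by_cases h1 : l.getD (k - W) "" = "Spoofing" <;> by_cases h2 : l.getD (k + W + 1) "" = "Spoofing" <;>
        simp only [h1, h2, if_true, if_false, ite_true, ite_false, eq_self_iff_true, not_false_iff] at SS ⊢ <;> omega
    · by_cases h1 : l.getD (k - W) "" = "Normal" <;> by_cases h2 : l.getD (k + W + 1) "" = "Normal" <;>
        simp only [h1, h2, if_true, if_false, ite_true, ite_false, eq_self_iff_true, not_false_iff] at SN ⊢ <;> omega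
  · simp only [pvSlideFun]
    rw [if_pos (show ((k : Int) - window ≥ 0) by omega)]
    rw [if_neg (show ¬ ((k : Int) + window + 1 < (n : Int)) by omega)]
    have e1 : (k : Int) - window = ((k - W : Nat) : Int) := by omega
    rw [e1]
    simp only [PySem.List.pyGetD_natCast, pvBump_eq, Prod.mk.injEq]
    rw [if_pos hlo, if_neg (show ¬ (k + W + 1 < l.length) by omega)] at SR SS SN
    refine ⟨by trivial, ?_, ?_, ?_⟩
    · by_cases h1 : l.getD (k - W) "" = "Replay" <;> simp only [h1, if_true, if_false, ite_true, ite_false, eq_self_iff_true, not_false_iff] at SR ⊢ <;> omega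
    · by_cases h1 : l.getD (k - W) "" = "Spoofing" <;> simp only [h1, if_true, if_false, ite_true, ite_false, eq_self_iff_true, not_false_iff] at SS ⊢ <;> omega
    · by_cases h1 : l.getD (k - W) "" = "Normal" <;> simp only [h1, if_true, if_false, ite_true, ite_false, eq_self_iff_true, not_false_iff] at SN ⊢ <;> omega
  · simp only [pvSlideFun]
    rw [if_neg (show ¬ ((k : Int) - window ≥ 0) by omega)]
    rw [if_pos (show ((k : Int) + window + 1 < (n : Int)) by omega)]
    have e2 : (k : Int) + window + 1 = ((k + W + 1 : Nat) : Int) := by omega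
    rw [e2]
    simp only [PySem.List.pyGetD_natCast, pvBump_eq, Prod.mk.injEq]
    rw [if_neg hlo, if_pos (show k + W + 1 < l.length by omega)] at SR SS SN
    refine ⟨by trivial, ?_, ?_, ?_⟩
    · by_cases h2 : l.getD (k + W + 1) "" = "Replay" <;> simp only [h2, if_true, if_false, ite_true, ite_false, eq_self_iff_true, not_false_iff] at SR ⊢ <;> omega
    · by_cases h2 : l.getD (k + W + 1) "" = "Spoofing" <;> simp only [h2, if_true, if_false, ite_true, ite_false, eq_self_iff_true, not_false_iff] at SS ⊢ <;> omega
    · by_cases h2 : l.getD (k + W + 1) "" = "Normal" <;> simp only [h2, if_true, if_false, ite_true, ite_false, eq_self_iff_true, not_false_iff] at SN ⊢ <;> omega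
  · simp only [pvSlideFun]
    rw [if_neg (show ¬ ((k : Int) - window ≥ 0) by omega)]
    rw [if_neg (show ¬ ((k : Int) + window + 1 < (n : Int)) by omega)]
    rw [if_neg hlo, if_neg (show ¬ (k + W + 1 < l.length) by omega)] at SR SS SN
    simp only [Prod.mk.injEq]
    refine ⟨by trivial, ?_, ?_, ?_⟩ <;> omega

def pvStepA (window : Int) (n : Nat) (out : List String) (i : Int) : List String :=
  if PySem.List.pyGetD out i "" ≠ "Replay" then out
  else
    let start := max 0 (i - window)
    let stop := min (n : Int) (i + window + 1)
    let ctx := PySem.List.slice out (some start) (some stop)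
    let cnt := PySem.Dict.counter ctx
    if cnt.getD "Replay" 0 == 1 then
      if cnt.getD "Spoofing" 0 > 0 then PySem.List.pySetD out i "Spoofing"
      else if cnt.getD "Normal" 0 > 0 && cnt.getD "Spoofing" 0 == 0 then PySem.List.pySetD out i "Normal"
      else out
    else out

theorem pvCtx (window : Int) (hw : 0 ≤ window) (l : List String) (n k : Nat)
    (hlen : l.length = n) (hk : k < n) (v : String) :
    (PySem.Dict.counter (PySem.List.slice l (some (max 0 ((k : Int) - window)))
        (some (min (n : Int) ((k : Int) + window + 1))))).getD v 0
      = (wcnt window.toNat l k v : Int) := by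
  rw [PySem.Dict.getD_counter]
  rw [PySem.List.slice_toNat l (by omega) (by omega)]
  have e1 : (max 0 ((k : Int) - window)).toNat = k - window.toNat := by omega
  have e2 : (min (n : Int) ((k : Int) + window + 1)).toNat = min n (k + window.toNat + 1) := by omega
  rw [e1, e2]
  unfold wcnt icount
  rw [hlen]

theorem pvWrite_inv (window : Int) (hw : 0 ≤ window) (l : List String) (n k : Nat)
    (hlen : l.length = n) (hk : k < n) :
    pvWrite window
      (l, (wcnt window.toNat l k "Replay" : Int), (wcnt window.toNat l k "Spoofing" : Int),
          (wcnt window.toNat l k "Normal" : Int)) (k : Int)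
    = (pvStepA window n l (k : Int),
       (wcnt window.toNat (pvStepA window n l (k : Int)) k "Replay" : Int),
       (wcnt window.toNat (pvStepA window n l (k : Int)) k "Spoofing" : Int),
       (wcnt window.toNat (pvStepA window n l (k : Int)) k "Normal" : Int)) := by
  have hkl : k < l.length := by omega
  simp only [pvWrite, pvStepA, PySem.List.pyGetD_natCast]
  rw [pvCtx window hw l n k hlen hk "Replay", pvCtx window hw l n k hlen hk "Spoofing",
      pvCtx window hw l n k hlen hk "Normal"]
  by_cases hR : l[k]?.getD "" = "Replay"
  · by_cases h1 : wcnt window.toNat l k "Replay" = 1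
    · by_cases hs : 0 < wcnt window.toNat l k "Spoofing"
      · have WR := wcnt_set window.toNat l k "Spoofing" "Replay" hkl
        have WS := wcnt_set window.toNat l k "Spoofing" "Spoofing" hkl
        have WN := wcnt_set window.toNat l k "Spoofing" "Normal" hkl
        simp [hR, h1] at WR WS WN
        simp [hR, h1, hs, show ((wcnt window.toNat l k "Spoofing" : Int)) > 0 from by exact_mod_cast hs,
              WR, WS, WN, PySem.List.pySetD_natCast]
      · by_cases hm : 0 < wcnt window.toNat l k "Normal"
        · have WR := wcnt_set window.toNat l k "Normal" "Replay" hkl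
          have WS := wcnt_set window.toNat l k "Normal" "Spoofing" hkl
          have WN := wcnt_set window.toNat l k "Normal" "Normal" hkl
          simp [hR, h1] at WR WS WN
          have hs0 : wcnt window.toNat l k "Spoofing" = 0 := by omega
          simp [hR, h1, hs0, hm, show ¬ ((wcnt window.toNat l k "Spoofing" : Int) > 0) from by simp [hs0],
                show ((wcnt window.toNat l k "Normal" : Int)) > 0 from by exact_mod_cast hm,
                WR, WS, WN, PySem.List.pySetD_natCast]
        · simp [hR, h1, hs, hm,
                show ¬ ((wcnt window.toNat l k "Spoofing" : Int) > 0) from by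
                  simp [show wcnt window.toNat l k "Spoofing" = 0 from by omega]]
    · simp [hR, h1, show ¬ ((wcnt window.toNat l k "Replay" : Int) = 1) from by exact_mod_cast h1]
  · simp [hR]

def pvStepB (window : Int) (n : Nat) (st : List String × Int × Int × Int) (i : Int) :
    List String × Int × Int × Int :=
  pvSlideFun window n (pvWrite window st i) i

theorem pvStepA_len (window : Int) (n : Nat) (l : List String) (i : Int) :
    (pvStepA window n l i).length = l.length := by
  simp only [pvStepA]
  split_ifs <;> simp [PySem.List.length_pySetD]

theorem pvInit_counts (l : List String) : ∀ (m : Nat), m ≤ l.length →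
    (List.range m).foldl (fun t k => pvBump (l.getD k "") 1 t) ((0, 0, 0) : Int × Int × Int)
      = ((icount l 0 m "Replay" : Int), (icount l 0 m "Spoofing" : Int), (icount l 0 m "Normal" : Int)) := by
  intro m
  induction m with
  | zero => intro _; simp [icount_empty]
  | succ p ih =>
    intro hm
    rw [List.range_succ, List.foldl_append, ih (by omega)]
    simp only [List.foldl_cons, List.foldl_nil, pvBump_eq]
    rw [icount_right l 0 p (by omega) (by omega), icount_right l 0 p (by omega) (by omega),
        icount_right l 0 p (by omega) (by omega)]
    simp only [Prod.mk.injEq]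
    refine ⟨?_, ?_, ?_⟩
    · by_cases h : l.getD p "" = "Replay" <;> simp [h]
    · by_cases h : l.getD p "" = "Spoofing" <;> simp [h]
    · by_cases h : l.getD p "" = "Normal" <;> simp [h]

theorem pvMain (labels : List String) (window : Int) (hw : 0 ≤ window) :
    ∀ (j : Nat), j ≤ labels.length →
      ((List.range j).foldl (fun st (k : Nat) => pvStepB window labels.length st (k : Int))
          (labels, (wcnt window.toNat labels 0 "Replay" : Int),
            (wcnt window.toNat labels 0 "Spoofing" : Int), (wcnt window.toNat labels 0 "Normal" : Int)))
        = (((List.range j).foldl (fun l (k : Nat) => pvStepA window labels.length l (k : Int)) labels),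
            (wcnt window.toNat ((List.range j).foldl (fun l (k : Nat) => pvStepA window labels.length l (k : Int)) labels) j "Replay" : Int),
            (wcnt window.toNat ((List.range j).foldl (fun l (k : Nat) => pvStepA window labels.length l (k : Int)) labels) j "Spoofing" : Int),
            (wcnt window.toNat ((List.range j).foldl (fun l (k : Nat) => pvStepA window labels.length l (k : Int)) labels) j "Normal" : Int))
      ∧ ((List.range j).foldl (fun l (k : Nat) => pvStepA window labels.length l (k : Int)) labels).length = labels.length := by
  intro j
  induction j with
  | zero => intro _; simp
  | succ p ih =>
    intro hm
    obtain ⟨hB, hL⟩ := ih (by omega)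
    rw [List.range_succ, List.foldl_append, List.foldl_append]
    simp only [List.foldl_cons, List.foldl_nil]
    rw [hB]
    constructor
    · show pvStepB window labels.length _ (p : Int) = _
      rw [pvStepB, pvWrite_inv window hw _ labels.length p hL (by omega),
          pvSlide_inv window hw _ labels.length p (by rw [pvStepA_len]; exact hL) (by omega)]
    · rw [pvStepA_len]
      exact hL

theorem pvA_eq (labels : List String) (window : Int) :
    replay_spoofing_heuristic labels window
      = (List.range labels.length).foldl (fun l (k : Nat) => pvStepA window labels.length l (k : Int)) labels := by
  simp only [replay_spoofing_heuristic]
  rw [PySem.List.pyRange_one, List.foldl_map]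
  have e : (((labels.length : Int)) - 0).toNat = labels.length := by omega
  rw [e]
  simp only [zero_add]
  rfl

theorem pvB_eq (labels : List String) (window : Int) (hw : 0 ≤ window) (hne : labels ≠ []) :
    replay_spoofing_heuristic_alt labels window
      = ((List.range labels.length).foldl
          (fun st (k : Nat) => pvStepB window labels.length st (k : Int))
          (labels,
            (List.range (min labels.length (window.toNat + 1))).foldl
              (fun t (k : Nat) => pvBump (PySem.List.pyGetD labels (k : Int) "") 1 t)
              ((0, 0, 0) : Int × Int × Int))).1 := by
  have hc1 : ¬ (window < 0) := by omega
  have hc2 : labels.length ≠ 0 := by simpa using hne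
  simp only [replay_spoofing_heuristic_alt]
  rw [if_neg (by simp [hc1, hc2])]
  rw [PySem.List.pyRange_one, List.foldl_map, PySem.List.pyRange_one, List.foldl_map]
  have e1 : (((labels.length : Int)) - 0).toNat = labels.length := by omega
  have e2 : ((min (labels.length : Int) (window + 1)) - 0).toNat = min labels.length (window.toNat + 1) := by omega
  rw [e1, e2]
  simp only [zero_add]
  rfl

theorem pv_final (labels : List String) (window : Int) (hw : 0 ≤ window) :
    replay_spoofing_heuristic labels window = replay_spoofing_heuristic_alt labels window := by
  by_cases hne : labels = []
  · subst hne
    simp [replay_spoofing_heuristic, replay_spoofing_heuristic_alt]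
  · rw [pvA_eq labels window, pvB_eq labels window hw hne]
    have hfun : (fun t (k : Nat) => pvBump (PySem.List.pyGetD labels (k : Int) "") 1 t)
        = (fun t (k : Nat) => pvBump (labels.getD k "") 1 t) := by
      funext t k
      rw [PySem.List.pyGetD_natCast]
    rw [hfun, pvInit_counts labels (min labels.length (window.toNat + 1)) (by omega),
        ← wcnt_zero, ← wcnt_zero, ← wcnt_zero,
        (pvMain labels window hw labels.length (le_refl _)).1]

-- ===== VERDICT (by name: the statement is the Claim_ definition above) =====
theorem replay_spoofing_heuristic_spec : Claim_equal_replay_spoofing_heuristic := by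
  intro labels window _hdom hpre
  unfold Spec_replay_spoofing_heuristic
  exact pv_final labels window hpre
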